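-- pv_equiv track=rewrite | github.com/chaibo/code_interviews_python | 38-字符串的排列/question3.py | cube_vertices_core
-- ===== SOURCE A (Python) =====
-- def cube_vertices_core(array, index):
--     length = len(array)
--     result = False
--     if index == length:
--         if ((array[0] + array[1] + array[2] + array[3])
--             == (array[4] + array[5] + array[6] + array[7])) \
--                 and ((array[0] + array[2] + array[4] + array[6])
--                      == (array[1] + array[3] + array[5] + array[7])) \
--                 and ((array[0] + array[1] + array[4] + array[5])
--                      == (array[3] + array[4] + array[6] + array[7])):
--             result = True
--     else:
--         for i in range(index, length):
--             temp = array[i]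
--             array[i] = array[index]
--             array[index] = temp
--
--             result = cube_vertices_core(array, index + 1)
--
--             temp = array[i]
--             array[i] = array[index]
--             array[index] = temp
--
--             if result:
--                 break
--
--     return result
-- ===== SOURCE B (Python) =====
-- import itertools
--
-- def _is_cube_ok(cand):
--     return ((cand[0] + cand[1] + cand[2] + cand[3])
--             == (cand[4] + cand[5] + cand[6] + cand[7])) \
--         and ((cand[0] + cand[2] + cand[4] + cand[6])
--              == (cand[1] + cand[3] + cand[5] + cand[7])) \
--         and ((cand[0] + cand[1] + cand[4] + cand[5])
--              == (cand[3] + cand[4] + cand[6] + cand[7]))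
--
-- def cube_vertices_core(array, index):
--     length = len(array)
--     if index == length:
--         return _is_cube_ok(array)
--     if index > length:
--         return False
--     prefix = array[:index]
--     for perm in itertools.permutations(array[index:]):
--         if _is_cube_ok(prefix + list(perm)):
--             return True
--     return False
-- ===== Notes on version B (the rewrite author's own statement) =====
-- stated objective: idiomatic
-- what changed: Replaces A's in-place swap-and-backtrack recursion by a non-mutating scan over itertools.permutations of the suffix, testing the three face-sum equalities on each candidate.
-- outside the precondition, e.g. on cube_vertices_core([1, 2, 3, 4, 5, 6, 7, 8], -1): A returns True, B returns False
import Mathlib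
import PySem

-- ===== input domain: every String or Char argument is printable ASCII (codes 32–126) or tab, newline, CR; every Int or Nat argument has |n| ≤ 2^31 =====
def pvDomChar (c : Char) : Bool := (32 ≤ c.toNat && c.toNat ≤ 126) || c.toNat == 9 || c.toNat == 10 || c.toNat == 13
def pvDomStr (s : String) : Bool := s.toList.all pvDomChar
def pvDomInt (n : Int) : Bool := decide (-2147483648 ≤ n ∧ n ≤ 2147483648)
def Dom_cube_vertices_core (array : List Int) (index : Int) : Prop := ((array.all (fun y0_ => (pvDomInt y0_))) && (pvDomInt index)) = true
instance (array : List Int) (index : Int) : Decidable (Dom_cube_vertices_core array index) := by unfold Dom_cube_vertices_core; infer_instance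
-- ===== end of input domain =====

-- B replaces A's in-place swap recursion by an itertools.permutations scan over the suffix (idiomatic);
-- A mutates `array` during the search but restores it before returning, B does not mutate; return values agree on Pre_.

-- ===== PORT A =====
-- the three-swap of Python's loop body: temp = array[i]; array[i] = array[index]; array[index] = temp
-- (.toNat / getD are exact here: inside Pre_ every i and index reaching a swap is a valid nonnegative position)
def cubeSwap (array : List Int) (i index : Int) : List Int :=
  let temp := array.getD i.toNat 0
  let a1 := array.set i.toNat (array.getD index.toNat 0)
  a1.set index.toNat temp

-- A's if-condition over array[0..7] (getD is exact: only evaluated when len ≥ 8 inside Pre_)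
def cubeCondA (a : List Int) : Bool :=
  (a.getD 0 0 + a.getD 1 0 + a.getD 2 0 + a.getD 3 0
     == a.getD 4 0 + a.getD 5 0 + a.getD 6 0 + a.getD 7 0)
  && (a.getD 0 0 + a.getD 2 0 + a.getD 4 0 + a.getD 6 0
     == a.getD 1 0 + a.getD 3 0 + a.getD 5 0 + a.getD 7 0)
  && (a.getD 0 0 + a.getD 1 0 + a.getD 4 0 + a.getD 5 0
     == a.getD 3 0 + a.getD 4 0 + a.getD 6 0 + a.getD 7 0)

-- A's `for i in range(index, length)` loop with the in-place swap, recursion, swap back, and break on result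
def cubeLoopA (recur : List Int → Int → Bool) (index : Int) : List Int → List Int → Bool
  | _, [] => false
  | array, i :: rest =>
    let a1 := cubeSwap array i index
    let result := recur a1 (index + 1)
    let a2 := cubeSwap a1 i index
    if result then result else cubeLoopA recur index a2 rest

-- fuel = recursion depth bound; length + 1 suffices for every input Pre_ admits
def cubeRecA : Nat → List Int → Int → Bool
  | 0, _, _ => false
  | fuel + 1, array, index =>
    let length : Int := array.length
    if index = length then cubeCondA array
    else cubeLoopA (cubeRecA fuel) index array (PySem.List.pyRange index length 1)

def cube_vertices_core (array : List Int) (index : Int) : Bool :=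
  cubeRecA (array.length + 1) array index

-- ===== PORT B =====
-- Source B's helper _is_cube_ok(cand)
def cubeOkB (cand : List Int) : Bool :=
  (cand.getD 0 0 + cand.getD 1 0 + cand.getD 2 0 + cand.getD 3 0
     == cand.getD 4 0 + cand.getD 5 0 + cand.getD 6 0 + cand.getD 7 0)
  && (cand.getD 0 0 + cand.getD 2 0 + cand.getD 4 0 + cand.getD 6 0
     == cand.getD 1 0 + cand.getD 3 0 + cand.getD 5 0 + cand.getD 7 0)
  && (cand.getD 0 0 + cand.getD 1 0 + cand.getD 4 0 + cand.getD 5 0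
     == cand.getD 3 0 + cand.getD 4 0 + cand.getD 6 0 + cand.getD 7 0)

-- itertools.permutations(suffix) scanned with any(); List.permutations is the corresponding library enumerator
def cube_vertices_core_alt (array : List Int) (index : Int) : Bool :=
  let length : Int := array.length
  if index = length then cubeOkB array
  else if index < length then
    let prefixL := PySem.List.slice array none (some index)
    let suffix := PySem.List.slice array (some index) none
    suffix.permutations.any (fun p => cubeOkB (prefixL ++ p))
  else false

-- ===== PRECONDITION & SPEC =====
-- Pre_ restricts to A's natural domain: index ≥ 0 (a negative index hits Python's negative-index wraparound,
-- outside the recursion's intent) and, whenever index ≤ len(array), len(array) ≥ 8 (otherwise A raises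
-- IndexError as soon as a full permutation is reached); index > len(array) returns False and stays admitted.
def Pre_cube_vertices_core (array : List Int) (index : Int) : Prop :=
  (array.length : Int) < index ∨ (0 ≤ index ∧ 8 ≤ array.length)
instance (array : List Int) (index : Int) : Decidable (Pre_cube_vertices_core array index) := by
  unfold Pre_cube_vertices_core; infer_instance

def pvWitness_cube_vertices_core : List Int × Int := ([1, 1, 1, 1, 1, 1, 1, 1], 6)

def Spec_cube_vertices_core (array : List Int) (index : Int) (out : Bool) : Prop := out = cube_vertices_core_alt array index
instance (array : List Int) (index : Int) (out : Bool) : Decidable (Spec_cube_vertices_core array index out) := by unfold Spec_cube_vertices_core; infer_instance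

-- ===== CLAIM (what is proved, stated in full; the proofs are below) =====
def Claim_equal_cube_vertices_core : Prop := ∀ (array : List Int) (index : Int), Dom_cube_vertices_core array index → Pre_cube_vertices_core array index → Spec_cube_vertices_core array index (cube_vertices_core array index)

-- ===== LEMMAS AND PROOFS =====

theorem length_cubeSwap (a : List Int) (i n : Int) : (cubeSwap a i n).length = a.length := by
  simp [cubeSwap]

theorem getElem_cubeSwap (a : List Int) (i n k : Nat)
    (hi : i < a.length) (hn : n < a.length) (hk : k < (cubeSwap a (i : Int) (n : Int)).length) :
    (cubeSwap a (i : Int) (n : Int))[k] =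
      if k = n then a[i] else if k = i then a[n]'hn else a[k]'(by simpa [length_cubeSwap] using hk) := by
  simp only [cubeSwap, Int.toNat_natCast, List.getElem_set,
    List.getD_eq_getElem a 0 hi, List.getD_eq_getElem a 0 hn]
  split_ifs <;> first | rfl | omega

theorem cubeSwap_cubeSwap (a : List Int) (i n : Nat) (hi : i < a.length) (hn : n < a.length) :
    cubeSwap (cubeSwap a (i : Int) (n : Int)) (i : Int) (n : Int) = a := by
  have hlen : (cubeSwap a (i : Int) (n : Int)).length = a.length := length_cubeSwap a _ _
  apply List.ext_getElem
  · simp [length_cubeSwap]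
  · intro k hk1 hk2
    rw [getElem_cubeSwap _ i n k (by omega) (by omega) hk1]
    by_cases hkn : k = n
    · rw [if_pos hkn, getElem_cubeSwap a i n i hi hn (by omega)]
      by_cases hin : i = n
      · rw [if_pos hin]
        simp only [show i = k from by omega]
      · rw [if_neg hin, if_pos rfl]
        simp only [show n = k from by omega]
    · rw [if_neg hkn]
      by_cases hki : k = i
      · rw [if_pos hki, getElem_cubeSwap a i n n hi hn (by omega), if_pos rfl]
        simp only [show i = k from by omega]
      · rw [if_neg hki, getElem_cubeSwap a i n k hi hn (by omega), if_neg hkn, if_neg hki]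

theorem take_cubeSwap (a : List Int) (i n : Nat) (hni : n ≤ i) (hi : i < a.length) :
    (cubeSwap a (i : Int) (n : Int)).take (n + 1) = a.take n ++ [a[i]'hi] := by
  have hn : n < a.length := lt_of_le_of_lt hni hi
  have hlen : (cubeSwap a (i : Int) (n : Int)).length = a.length := length_cubeSwap a _ _
  rw [List.take_add_one]
  have h1 : (cubeSwap a (i : Int) (n : Int))[n]? = some (a[i]'hi) := by
    rw [List.getElem?_eq_getElem (by omega)]
    rw [getElem_cubeSwap a i n n hi hn (by omega), if_pos rfl]
  rw [h1]
  congr 1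
  apply List.ext_getElem
  · simp [length_cubeSwap]
  · intro k hk1 hk2
    have hkn : k < n := by
      have := hk1; simp only [List.length_take, length_cubeSwap] at this; omega
    rw [List.getElem_take, List.getElem_take,
      getElem_cubeSwap a i n k hi hn (by simp only [length_cubeSwap]; omega)]
    rw [if_neg (by omega), if_neg (by omega)]

theorem cons_set_perm (t : List Int) (k : Nat) (hk : k < t.length) (x : Int) :
    ((t[k]'hk) :: t.set k x).Perm (x :: t) := by
  induction t generalizing k with
  | nil => simp at hk
  | cons y t' ih =>
    cases k with
    | zero => simpa using List.Perm.swap x y t'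
    | succ k' =>
      have hk' : k' < t'.length := by simpa using hk
      simp only [List.getElem_cons_succ, List.set_cons_succ]
      exact (List.Perm.swap y (t'[k']'hk') (t'.set k' x)).trans
        (((ih k' hk').cons y).trans (List.Perm.swap x y t'))

theorem swap01_perm (l : List Int) (j : Nat) (hj : j < l.length) :
    ((l.set j (l[0]'(Nat.lt_of_le_of_lt (Nat.zero_le j) hj))).set 0 (l[j]'hj)).Perm l := by
  cases j with
  | zero => simp [List.set_getElem_self]
  | succ k =>
    cases l with
    | nil => simp at hj
    | cons x t =>
      have hk : k < t.length := by simpa using hj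
      simp only [List.getElem_cons_zero, List.set_cons_succ, List.getElem_cons_succ,
        List.set_cons_zero]
      exact cons_set_perm t k hk x

theorem drop_cubeSwap_perm (a : List Int) (i n : Nat) (hni : n ≤ i) (hi : i < a.length) :
    ((cubeSwap a (i : Int) (n : Int)).drop n).Perm (a.drop n) := by
  have hn : n < a.length := lt_of_le_of_lt hni hi
  have hdrop : (cubeSwap a (i : Int) (n : Int)).drop n
      = ((a.drop n).set (i - n) (a[n]'hn)).set 0 (a[i]'hi) := by
    simp only [cubeSwap, Int.toNat_natCast, List.getD_eq_getElem a 0 hi,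
      List.getD_eq_getElem a 0 hn, List.drop_set]
    rw [if_neg (by omega), if_neg (by omega)]
    simp only [Nat.sub_self]
  have hperm := swap01_perm (a.drop n) (i - n) (by simp only [List.length_drop]; omega)
  simp only [List.getElem_drop, Nat.add_zero] at hperm
  simp only [show n + (i - n) = i from by omega] at hperm
  rw [hdrop]
  exact hperm

theorem cubeLoopA_eq_true_iff (recur : List Int → Int → Bool) (index : Int) (is : List Int) :
    ∀ (a : List Int), (∀ i ∈ is, cubeSwap (cubeSwap a i index) i index = a) →
      (cubeLoopA recur index a is = true ↔ ∃ i ∈ is, recur (cubeSwap a i index) (index + 1) = true) := by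
  induction is with
  | nil => intro a _; simp [cubeLoopA]
  | cons i rest ih =>
    intro a hinv
    simp only [cubeLoopA]
    by_cases hr : recur (cubeSwap a i index) (index + 1) = true
    · simp [hr]
    · rw [Bool.not_eq_true] at hr
      rw [hr]
      simp only [Bool.false_eq_true, if_false]
      rw [hinv i (List.mem_cons_self)]
      rw [ih a (fun j hj => hinv j (List.mem_cons_of_mem i hj))]
      simp [hr]

theorem cubeRecA_eq_true_iff (fuel : Nat) : ∀ (a : List Int) (n : Nat), n ≤ a.length →
    a.length - n < fuel →
    (cubeRecA fuel a (n : Int) = true ↔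
      ∃ p, p.Perm (a.drop n) ∧ cubeOkB (a.take n ++ p) = true) := by
  induction fuel with
  | zero => intro a n _ h2; omega
  | succ fuel ih =>
    intro a n hn hfuel
    by_cases hend : n = a.length
    · subst hend
      simp only [cubeRecA]
      rw [if_pos trivial]
      constructor
      · intro h
        exact ⟨[], by simp, by simpa [List.take_length, cubeCondA, cubeOkB] using h⟩
      · rintro ⟨p, hp, hok⟩
        rw [List.drop_length, List.perm_nil] at hp
        subst hp
        simpa [List.take_length, cubeCondA, cubeOkB] using hok
    · have hlt : n < a.length := by omega
      have hne : (n : Int) ≠ (a.length : Int) := by exact_mod_cast hend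
      simp only [cubeRecA, if_neg hne]
      -- the loop enumerates i = n .. length-1
      have hinv : ∀ i ∈ PySem.List.pyRange (n : Int) (a.length : Int) 1,
          cubeSwap (cubeSwap a i (n : Int)) i (n : Int) = a := by
        intro i hi
        rw [PySem.List.mem_pyRange_one] at hi
        obtain ⟨i', rfl⟩ : ∃ i' : Nat, i = (i' : Int) := ⟨i.toNat, by omega⟩
        exact cubeSwap_cubeSwap a i' n (by exact_mod_cast hi.2) hlt
      rw [cubeLoopA_eq_true_iff (cubeRecA fuel) (n : Int) _ a hinv]
      constructor
      · rintro ⟨i, hmem, hrec⟩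
        rw [PySem.List.mem_pyRange_one] at hmem
        obtain ⟨i', rfl⟩ : ∃ i' : Nat, i = (i' : Int) := ⟨i.toNat, by omega⟩
        have hni : n ≤ i' := by exact_mod_cast hmem.1
        have hi : i' < a.length := by exact_mod_cast hmem.2
        have hlen : (cubeSwap a (i' : Int) (n : Int)).length = a.length := length_cubeSwap a _ _
        have : ((n : Int) + 1) = ((n + 1 : Nat) : Int) := by push_cast; ring
        rw [this] at hrec
        rw [ih (cubeSwap a (i' : Int) (n : Int)) (n + 1) (by omega) (by omega)] at hrec
        obtain ⟨p, hp, hok⟩ := hrec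
        refine ⟨a[i'] :: p, ?_, ?_⟩
        · have h1 : (cubeSwap a (i' : Int) (n : Int)).drop n
              = a[i'] :: (cubeSwap a (i' : Int) (n : Int)).drop (n + 1) := by
            rw [List.drop_eq_getElem_cons (by omega)]
            rw [getElem_cubeSwap a i' n n hi hlt (by omega), if_pos rfl]
          have h2 : (a[i'] :: p).Perm ((cubeSwap a (i' : Int) (n : Int)).drop n) := by
            rw [h1]; exact hp.cons _
          exact h2.trans (drop_cubeSwap_perm a i' n hni hi)
        · rw [take_cubeSwap a i' n hni hi] at hok
          simpa using hok
      · rintro ⟨q, hq, hok⟩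
        have hqlen : q.length = a.length - n := by rw [hq.length_eq]; simp
        obtain ⟨h, p, rfl⟩ : ∃ h p, q = h :: p := by
          cases q with
          | nil => simp at hqlen; omega
          | cons h p => exact ⟨h, p, rfl⟩
        have hmem : h ∈ a.drop n := hq.mem_iff.mp List.mem_cons_self
        obtain ⟨k, hk, hkeq⟩ := List.getElem_of_mem hmem
        have hklen : k < a.length - n := by simpa using hk
        have hik : a[n + k]'(by omega) = h := by
          rw [← hkeq, List.getElem_drop]
        refine ⟨(n + k : Nat), ?_, ?_⟩
        · rw [PySem.List.mem_pyRange_one]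
          refine ⟨by exact_mod_cast Nat.le_add_right n k, by exact_mod_cast (by omega : n + k < a.length)⟩
        · have hni : n ≤ n + k := Nat.le_add_right n k
          have hi : n + k < a.length := by omega
          have : ((n : Int) + 1) = ((n + 1 : Nat) : Int) := by push_cast; ring
          rw [this, ih (cubeSwap a ((n + k : Nat) : Int) (n : Int)) (n + 1) (by simp [length_cubeSwap]; omega) (by simp [length_cubeSwap]; omega)]
          refine ⟨p, ?_, ?_⟩
          · have h1 : (cubeSwap a ((n + k : Nat) : Int) (n : Int)).drop n
                = a[n + k] :: (cubeSwap a ((n + k : Nat) : Int) (n : Int)).drop (n + 1) := by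
              rw [List.drop_eq_getElem_cons (by simp [length_cubeSwap]; omega)]
              rw [getElem_cubeSwap a (n + k) n n hi hlt (by simp [length_cubeSwap]; omega), if_pos rfl]
            have h3 : ((cubeSwap a ((n + k : Nat) : Int) (n : Int)).drop n).Perm (h :: p) :=
              (drop_cubeSwap_perm a (n + k) n hni hi).trans hq.symm
            rw [h1, hik] at h3
            exact (h3.cons_inv).symm
          · rw [take_cubeSwap a (n + k) n hni hi, hik]
            simpa using hok

theorem alt_eq_true_iff (a : List Int) (n : Nat) (hn : n ≤ a.length) :
    (cube_vertices_core_alt a (n : Int) = true ↔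
      ∃ p, p.Perm (a.drop n) ∧ cubeOkB (a.take n ++ p) = true) := by
  by_cases hend : n = a.length
  · subst hend
    simp only [cube_vertices_core_alt]
    rw [if_pos trivial]
    constructor
    · intro h; exact ⟨[], by simp, by simpa [List.take_length] using h⟩
    · rintro ⟨p, hp, hok⟩
      rw [List.drop_length, List.perm_nil] at hp
      subst hp
      simpa [List.take_length] using hok
  · have hlt : n < a.length := by omega
    have hne : (n : Int) ≠ (a.length : Int) := by exact_mod_cast hend
    have hlt' : (n : Int) < (a.length : Int) := by exact_mod_cast hlt
    simp only [cube_vertices_core_alt, if_neg hne, if_pos hlt']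
    rw [PySem.List.slice_to_natCast, PySem.List.slice_from_natCast]
    rw [List.any_eq_true]
    constructor
    · rintro ⟨p, hmem, hok⟩
      exact ⟨p, List.mem_permutations.mp hmem, hok⟩
    · rintro ⟨p, hp, hok⟩
      exact ⟨p, List.mem_permutations.mpr hp, hok⟩

-- ===== VERDICT (by name: the statement is the Claim_ definition above) =====
theorem cube_vertices_core_spec : Claim_equal_cube_vertices_core := by
  intro array index _hdom hpre
  unfold Spec_cube_vertices_core
  by_cases hgt : (array.length : Int) < index
  · -- index > length: A's range is empty, B's trailing else; both False
    have hne : index ≠ (array.length : Int) := by omega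
    have h1 : cube_vertices_core array index = false := by
      simp only [cube_vertices_core, cubeRecA, if_neg hne]
      rw [PySem.List.pyRange_one_eq_nil (by omega)]
      simp [cubeLoopA]
    have h2 : cube_vertices_core_alt array index = false := by
      simp only [cube_vertices_core_alt, if_neg hne, if_neg (by omega : ¬ index < (array.length : Int))]
    rw [h1, h2]
  · have h0 : 0 ≤ index := by
      rcases hpre with h | h
      · omega
      · exact h.1
    obtain ⟨n, rfl⟩ : ∃ n : Nat, index = (n : Int) := ⟨index.toNat, by omega⟩
    have hn : n ≤ array.length := by omega
    rw [Bool.eq_iff_iff]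
    rw [show cube_vertices_core array (n : Int) = cubeRecA (array.length + 1) array (n : Int) from rfl]
    rw [cubeRecA_eq_true_iff (array.length + 1) array n hn (by omega)]
    exact (alt_eq_true_iff array n hn).symm
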